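-- pv_equiv track=rewrite | github.com/Gustavarendd/OSM-TSS-tiles | geojson_backend.py | _parse_seamark_type
-- ===== SOURCE A (Python) =====
-- from typing import Dict, Iterable, List, Optional, Sequence, Tuple, Union, Set
--
-- def _parse_seamark_type(props: Dict) -> Optional[str]:
-- 	"""Extract seamark:type from either explicit field or encoded other_tags string."""
-- 	# direct field variants
-- 	for key in ("seamark:type", "seamark_type", "seamark_type" ):
-- 		if key in props and props[key]:
-- 			return props[key]
-- 	ot = props.get("other_tags")
-- 	if not isinstance(ot, str):
-- 		return None
-- 	# naive scan for pattern "seamark:type"=>"<value>"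
-- 	marker = '"seamark:type"=>"'
-- 	idx = ot.find(marker)
-- 	if idx == -1:
-- 		return None
-- 	start = idx + len(marker)
-- 	end = ot.find('"', start)
-- 	if end == -1:
-- 		return None
-- 	return ot[start:end]
-- ===== SOURCE B (Python) =====
-- from typing import Dict, Optional
--
--
-- def _parse_seamark_type(props: Dict) -> Optional[str]:
-- 	"""Extract seamark:type from either explicit field or encoded other_tags string."""
-- 	direct = props.get("seamark:type") or props.get("seamark_type")
-- 	if direct:
-- 		return direct
-- 	ot = props.get("other_tags")
-- 	if not isinstance(ot, str):
-- 		return None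
-- 	# single left-to-right scan: locate the marker, then collect chars up to the closing quote
-- 	marker = '"seamark:type"=>"'
-- 	for i in range(len(ot)):
-- 		if ot[i:].startswith(marker):
-- 			out = []
-- 			for ch in ot[i + len(marker):]:
-- 				if ch == '"':
-- 					return ''.join(out)
-- 				out.append(ch)
-- 			return None
-- 	return None
-- ===== Notes on version B (the rewrite author's own statement) =====
-- stated objective: alternative
-- what changed: A's two find() passes plus slicing are replaced by one explicit left-to-right state-machine scan that checks each suffix for the marker and then accumulates value characters up to the closing quote; A's three-key loop is replaced by an or-chain of two lookups.
import Mathlib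
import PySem

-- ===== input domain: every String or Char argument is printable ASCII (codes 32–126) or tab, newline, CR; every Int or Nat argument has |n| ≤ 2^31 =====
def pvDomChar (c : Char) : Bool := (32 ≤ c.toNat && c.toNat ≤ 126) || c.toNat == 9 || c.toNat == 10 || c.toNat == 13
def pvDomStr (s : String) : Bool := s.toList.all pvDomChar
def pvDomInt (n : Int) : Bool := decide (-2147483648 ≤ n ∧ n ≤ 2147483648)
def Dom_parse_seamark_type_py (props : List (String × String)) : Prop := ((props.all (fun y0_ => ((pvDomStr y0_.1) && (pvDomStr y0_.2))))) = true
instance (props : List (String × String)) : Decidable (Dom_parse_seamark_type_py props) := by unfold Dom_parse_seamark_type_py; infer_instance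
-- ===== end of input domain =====

-- B replaces A's two find/slice passes by one explicit left-to-right scan (state machine over the
-- string's tails) and A's key loop by an or-chain of lookups; objective: alternative (same cost).

-- ===== PORT A =====
-- A's loop 'for key in (…): if key in props and props[key]: return props[key]'
def pvDirectA (props : List (String × String)) : List String → Option String
  | [] => none
  | k :: rest =>
    match (PySem.Dict.mk props).get? k with
    | some v => if v.toList ≠ [] then some v else pvDirectA props rest
    | none => pvDirectA props rest

def parse_seamark_type_py (props : List (String × String)) : Option String :=
  match pvDirectA props ["seamark:type", "seamark_type", "seamark_type"] with
  | some v => some v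
  | none =>
    -- ot = props.get("other_tags"); not a str (= a missing key under the type convention) → None
    match (PySem.Dict.mk props).get? "other_tags" with
    | none => none
    | some ot =>
      let marker : String := "\"seamark:type\"=>\""
      let idx := PySem.Str.find ot marker
      if idx = -1 then none
      else
        let start := idx + PySem.Str.len marker
        let e := PySem.Str.findFrom ot "\"" start none
        if e = -1 then none
        else some (PySem.Str.slice ot (some start) (some e))

-- ===== PORT B =====
-- truthiness of props.get(...): a missing key (None) and the empty string are falsy
def pvTruthy : Option String → Bool
  | none => false
  | some s => !s.toList.isEmpty

-- inner loop: 'for ch in …: if ch == '"': return ''.join(out); out.append(ch)' then 'return None'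
def pvScanVal : List Char → List Char → Option String
  | _out, [] => none
  | out, ch :: rest => if ch = '"' then some (String.ofList out) else pvScanVal (out ++ [ch]) rest

-- outer loop: 'for i in range(len(ot)): if ot[i:].startswith(marker): …' — i ↦ successive tails
def pvScanMarker (marker : List Char) : List Char → Option String
  | [] => none
  | c :: rest =>
    if PySem.Chars.startswith (c :: rest) marker then
      pvScanVal [] ((c :: rest).drop marker.length)
    else pvScanMarker marker rest

def parse_seamark_type_py_alt (props : List (String × String)) : Option String :=
  let g1 := (PySem.Dict.mk props).get? "seamark:type"
  let direct := if pvTruthy g1 then g1 else (PySem.Dict.mk props).get? "seamark_type"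
  if pvTruthy direct then direct
  else
    match (PySem.Dict.mk props).get? "other_tags" with
    | none => none
    | some ot => pvScanMarker "\"seamark:type\"=>\"".toList ot.toList

-- ===== PRECONDITION & SPEC =====
def Spec_parse_seamark_type_py (props : List (String × String)) (out : Option String) : Prop := out = parse_seamark_type_py_alt props
instance (props : List (String × String)) (out : Option String) : Decidable (Spec_parse_seamark_type_py props out) := by unfold Spec_parse_seamark_type_py; infer_instance

-- ===== CLAIM (what is proved, stated in full; the proofs are below) =====
def Claim_equal_parse_seamark_type_py : Prop := ∀ (props : List (String × String)), Dom_parse_seamark_type_py props → Spec_parse_seamark_type_py props (parse_seamark_type_py props)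

-- ===== LEMMAS AND PROOFS =====

-- A's other_tags computation, restated at the List Char level
def pvAExtract (M s : List Char) : Option String :=
  let idx := PySem.Chars.find s M
  if idx = -1 then none
  else
    let start := idx + (M.length : Int)
    let e := PySem.Chars.findFrom s ['"'] start none
    if e = -1 then none
    else some (String.ofList (PySem.Chars.slice s (some start) (some e)))

theorem pv_find_cons (c : Char) (rest sub : List Char) :
    PySem.Chars.find (c :: rest) sub =
      if sub <+: c :: rest then 0
      else if PySem.Chars.find rest sub = -1 then -1
      else PySem.Chars.find rest sub + 1 := by
  by_cases hp : sub <+: c :: rest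
  · simp only [hp, if_true]
    have hinf : sub <:+: c :: rest := hp.isInfix
    have hne : PySem.Chars.find (c :: rest) sub ≠ -1 := by
      rw [ne_eq, PySem.Chars.find_eq_neg_one_iff]; exact not_not_intro hinf
    have h0 : 0 ≤ PySem.Chars.find (c :: rest) sub := by
      have := PySem.Chars.neg_one_le_find (c :: rest) sub; omega
    obtain ⟨hpre, hmin⟩ := PySem.Chars.find_spec h0
    by_contra hne0
    have hk : 0 < (PySem.Chars.find (c :: rest) sub).toNat := by omega
    exact hmin 0 hk (by simpa using hp)
  · simp only [hp, if_false]
    by_cases hr : PySem.Chars.find rest sub = -1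
    · simp only [hr, if_true]
      rw [PySem.Chars.find_eq_neg_one_iff]
      rw [PySem.Chars.find_eq_neg_one_iff] at hr
      rw [List.infix_cons_iff]
      tauto
    · simp only [hr, if_false]
      have h0r : 0 ≤ PySem.Chars.find rest sub := by
        have := PySem.Chars.neg_one_le_find rest sub; omega
      obtain ⟨hpr, hminr⟩ := PySem.Chars.find_spec h0r
      have hinf : sub <:+: c :: rest := by
        rw [List.infix_cons_iff]
        exact Or.inr (hpr.isInfix.trans (List.drop_suffix _ rest).isInfix)
      have hnec : PySem.Chars.find (c :: rest) sub ≠ -1 := by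
        rw [ne_eq, PySem.Chars.find_eq_neg_one_iff]; exact not_not_intro hinf
      have h0c : 0 ≤ PySem.Chars.find (c :: rest) sub := by
        have := PySem.Chars.neg_one_le_find (c :: rest) sub; omega
      obtain ⟨hpc, hminc⟩ := PySem.Chars.find_spec h0c
      have hc0 : (PySem.Chars.find (c :: rest) sub).toNat ≠ 0 := by
        intro h; rw [h] at hpc; simp at hpc; exact hp hpc
      -- ≥ : prefix at (fc-1) in rest, minimality of fr
      have hge : (PySem.Chars.find rest sub).toNat ≤ (PySem.Chars.find (c :: rest) sub).toNat - 1 := by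
        by_contra hlt
        push_neg at hlt
        have := hminr ((PySem.Chars.find (c :: rest) sub).toNat - 1) (by omega)
        apply this
        have : rest.drop ((PySem.Chars.find (c :: rest) sub).toNat - 1)
            = (c :: rest).drop (PySem.Chars.find (c :: rest) sub).toNat := by
          rw [← List.drop_succ_cons]
          congr 1
          omega
        rw [this]
        exact hpc
      have hle : (PySem.Chars.find (c :: rest) sub).toNat ≤ (PySem.Chars.find rest sub).toNat + 1 := by
        by_contra hlt
        push_neg at hlt
        have := hminc ((PySem.Chars.find rest sub).toNat + 1) (by omega)
        apply this
        rw [List.drop_succ_cons]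
        exact hpr
      omega

theorem pv_scanVal_eq (t : List Char) (acc : List Char) :
    pvScanVal acc t =
      if PySem.Chars.find t ['"'] = -1 then none
      else some (String.ofList (acc ++ t.take (PySem.Chars.find t ['"']).toNat)) := by
  induction t generalizing acc with
  | nil =>
    have : PySem.Chars.find [] ['"'] = -1 := by
      rw [PySem.Chars.find_eq_neg_one_iff]; simp [List.infix_nil]
    simp [pvScanVal, this]
  | cons ch t ih =>
    rw [pv_find_cons]
    by_cases hq : ch = '"'
    · have hpre : ['"'] <+: ch :: t := by simp [List.cons_prefix_cons, hq]
      simp [pvScanVal, hq, hpre]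
    · have hpre : ¬ (['"'] <+: ch :: t) := by
        simp [List.cons_prefix_cons]; exact fun h => hq h.symm
      simp only [hpre, if_false]
      by_cases hr : PySem.Chars.find t ['"'] = -1
      · simp [pvScanVal, hq, hr, ih]
      · have h0 : 0 ≤ PySem.Chars.find t ['"'] := by
          have := PySem.Chars.neg_one_le_find t ['"']; omega
        have htn : (PySem.Chars.find t ['"'] + 1).toNat = (PySem.Chars.find t ['"']).toNat + 1 := by
          omega
        have hne : PySem.Chars.find t ['"'] + 1 ≠ -1 := by omega
        simp only [pvScanVal, hq, if_false, hr, hne, ih, htn, List.take_succ_cons]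
        simp

theorem pv_scanMarker_eq (M : List Char) (hM : M ≠ []) (s : List Char) :
    pvScanMarker M s = pvAExtract M s := by
  induction s with
  | nil =>
    have hfind : PySem.Chars.find [] M = -1 := by
      rw [PySem.Chars.find_eq_neg_one_iff, List.infix_nil]; exact hM
    simp [pvScanMarker, pvAExtract, hfind]
  | cons c rest ih =>
    by_cases hp : M <+: c :: rest
    · -- marker is a prefix: A finds it at 0
      have hsw : PySem.Chars.startswith (c :: rest) M = true :=
        (PySem.Chars.startswith_iff _ _).mpr hp
      have hfind : PySem.Chars.find (c :: rest) M = 0 := by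
        rw [pv_find_cons]; simp [hp]
      have hlen : M.length ≤ (c :: rest).length := hp.length_le
      have hff : PySem.Chars.findFrom (c :: rest) ['"'] ((M.length : Int)) none =
          if PySem.Chars.find ((c :: rest).drop M.length) ['"'] = -1 then -1
          else (M.length : Int) + PySem.Chars.find ((c :: rest).drop M.length) ['"'] :=
        PySem.Chars.findFrom_natCast _ _ _ hlen
      rw [pvScanMarker]
      rw [if_pos hsw, pv_scanVal_eq]
      unfold pvAExtract
      simp only [hfind, zero_add]
      by_cases hq : PySem.Chars.find ((c :: rest).drop M.length) ['"'] = -1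
      · simp [hq, hff]
      · have h0 : 0 ≤ PySem.Chars.find ((c :: rest).drop M.length) ['"'] := by
          have := PySem.Chars.neg_one_le_find ((c :: rest).drop M.length) ['"']; omega
        have hene : (M.length : Int) + PySem.Chars.find ((c :: rest).drop M.length) ['"'] ≠ -1 := by
          omega
        have hslice : PySem.Chars.slice (c :: rest) (some (M.length : Int))
            (some ((M.length : Int) + PySem.Chars.find ((c :: rest).drop M.length) ['"'])) =
            ((c :: rest).drop M.length).take (PySem.Chars.find ((c :: rest).drop M.length) ['"']).toNat := by
          rw [PySem.Chars.slice_eq_listSlice, PySem.List.slice_toNat _ (by positivity) (by omega)]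
          congr 1 <;> omega
        simp only [hq, if_false, hff, hene, hslice]
        simp
    · -- not a prefix here: both sides step to `rest`
      have hsw : PySem.Chars.startswith (c :: rest) M = false := by
        rw [← Bool.not_eq_true, PySem.Chars.startswith_iff]; exact hp
      rw [pvScanMarker, if_neg (by simp [hsw]), ih]
      unfold pvAExtract
      rw [pv_find_cons, if_neg hp]
      by_cases hr : PySem.Chars.find rest M = -1
      · simp [hr]
      · have h0r : 0 ≤ PySem.Chars.find rest M := by
          have := PySem.Chars.neg_one_le_find rest M; omega
        obtain ⟨hpr, -⟩ := PySem.Chars.find_spec h0r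
        have hlenr : (PySem.Chars.find rest M).toNat + M.length ≤ rest.length := by
          have h1 := hpr.length_le
          have h2 : (rest.drop (PySem.Chars.find rest M).toNat).length
              = rest.length - (PySem.Chars.find rest M).toNat := by simp
          rw [h2] at h1
          have h3 := PySem.Chars.find_le_length rest M
          omega
        have hne1 : PySem.Chars.find rest M + 1 ≠ -1 := by omega
        simp only [hne1, if_false, hr]
        -- rewrite both findFrom via natCast
        have hcastc : PySem.Chars.find rest M + 1 + (M.length : Int)
            = (((PySem.Chars.find rest M).toNat + 1 + M.length : Nat) : Int) := by
          push_cast; omega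
        have hcastr : PySem.Chars.find rest M + (M.length : Int)
            = (((PySem.Chars.find rest M).toNat + M.length : Nat) : Int) := by
          push_cast; omega
        have hffc := PySem.Chars.findFrom_natCast (c :: rest) ['"']
            ((PySem.Chars.find rest M).toNat + 1 + M.length) (by simp; omega)
        have hffr := PySem.Chars.findFrom_natCast rest ['"']
            ((PySem.Chars.find rest M).toNat + M.length) hlenr
        have hdrop : (c :: rest).drop ((PySem.Chars.find rest M).toNat + 1 + M.length)
            = rest.drop ((PySem.Chars.find rest M).toNat + M.length) := by
          rw [show (PySem.Chars.find rest M).toNat + 1 + M.length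
              = ((PySem.Chars.find rest M).toNat + M.length) + 1 by omega, List.drop_succ_cons]
        rw [hcastc, hcastr, hffc, hffr, hdrop]
        by_cases hq : PySem.Chars.find (rest.drop ((PySem.Chars.find rest M).toNat + M.length)) ['"'] = -1
        · simp [hq]
        · have h0q : 0 ≤ PySem.Chars.find (rest.drop ((PySem.Chars.find rest M).toNat + M.length)) ['"'] := by
            have := PySem.Chars.neg_one_le_find (rest.drop ((PySem.Chars.find rest M).toNat + M.length)) ['"']; omega
          simp only [hq, if_false]
          have hne2 : ¬((((PySem.Chars.find rest M).toNat + 1 + M.length : Nat) : Int) + PySem.Chars.find (rest.drop ((PySem.Chars.find rest M).toNat + M.length)) ['"'] = -1) := by push_cast; omega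
          have hne3 : ¬((((PySem.Chars.find rest M).toNat + M.length : Nat) : Int) + PySem.Chars.find (rest.drop ((PySem.Chars.find rest M).toNat + M.length)) ['"'] = -1) := by push_cast; omega
          rw [if_neg hne2, if_neg hne3]
          rw [← hcastc, ← hcastr]
          have hsl1 : PySem.Chars.slice (c :: rest)
              (some (PySem.Chars.find rest M + 1 + (M.length : Int)))
              (some (PySem.Chars.find rest M + 1 + (M.length : Int) + PySem.Chars.find (rest.drop ((PySem.Chars.find rest M).toNat + M.length)) ['"'])) =
              (rest.drop ((PySem.Chars.find rest M).toNat + M.length)).take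
                (PySem.Chars.find (rest.drop ((PySem.Chars.find rest M).toNat + M.length)) ['"']).toNat := by
            rw [PySem.Chars.slice_eq_listSlice, PySem.List.slice_toNat _ (by omega) (by omega)]
            rw [show (PySem.Chars.find rest M + 1 + (M.length : Int)).toNat
                = ((PySem.Chars.find rest M).toNat + M.length) + 1 by omega, List.drop_succ_cons]
            congr 1
            omega
          have hsl2 : PySem.Chars.slice rest
              (some (PySem.Chars.find rest M + (M.length : Int)))
              (some (PySem.Chars.find rest M + (M.length : Int) + PySem.Chars.find (rest.drop ((PySem.Chars.find rest M).toNat + M.length)) ['"'])) =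
              (rest.drop ((PySem.Chars.find rest M).toNat + M.length)).take
                (PySem.Chars.find (rest.drop ((PySem.Chars.find rest M).toNat + M.length)) ['"']).toNat := by
            rw [PySem.Chars.slice_eq_listSlice, PySem.List.slice_toNat _ (by omega) (by omega)]
            rw [show (PySem.Chars.find rest M + (M.length : Int)).toNat
                = (PySem.Chars.find rest M).toNat + M.length by omega]
            congr 1
            omega
          rw [hsl1, hsl2]

-- Str-level bridge: A's slice expression is the ofList of the Chars slice
theorem pv_str_slice_ofList (ot : String) (a b : Option Int) :
    PySem.Str.slice ot a b = String.ofList (PySem.Chars.slice ot.toList a b) := by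
  rw [← PySem.Str.toList_slice]
  exact String.ofList_toList.symm

-- A's other_tags tail equals pvAExtract on the char lists
theorem pv_tail_eq (ot : String) :
    (let marker : String := "\"seamark:type\"=>\""
     let idx := PySem.Str.find ot marker
     if idx = -1 then none
     else
       let start := idx + PySem.Str.len marker
       let e := PySem.Str.findFrom ot "\"" start none
       if e = -1 then none
       else some (PySem.Str.slice ot (some start) (some e)))
    = pvAExtract ("\"seamark:type\"=>\"".toList) ot.toList := by
  unfold pvAExtract
  simp only [PySem.Str.find_eq, PySem.Str.findFrom_eq, PySem.Str.len_eq, pv_str_slice_ofList,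
    show ("\"" : String).toList = ['"'] from by decide]

theorem pv_direct_eq (props : List (String × String)) :
    pvDirectA props ["seamark:type", "seamark_type", "seamark_type"] =
      (if pvTruthy (if pvTruthy ((PySem.Dict.mk props).get? "seamark:type") = true
                    then (PySem.Dict.mk props).get? "seamark:type"
                    else (PySem.Dict.mk props).get? "seamark_type") = true
       then (if pvTruthy ((PySem.Dict.mk props).get? "seamark:type") = true
             then (PySem.Dict.mk props).get? "seamark:type"
             else (PySem.Dict.mk props).get? "seamark_type")
       else none) := by
  cases h1 : (PySem.Dict.mk props).get? "seamark:type" with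
  | none =>
    cases h2 : (PySem.Dict.mk props).get? "seamark_type" with
    | none => simp [pvDirectA, pvTruthy, h1, h2]
    | some v =>
      by_cases hv : v.toList = [] <;> simp [pvDirectA, pvTruthy, h1, h2, hv]
  | some v =>
    cases h2 : (PySem.Dict.mk props).get? "seamark_type" with
    | none =>
      by_cases hv : v.toList = [] <;> simp [pvDirectA, pvTruthy, h1, h2, hv]
    | some w =>
      by_cases hv : v.toList = [] <;> by_cases hw : w.toList = [] <;>
        simp [pvDirectA, pvTruthy, h1, h2, hv, hw]

-- ===== VERDICT (by name: the statement is the Claim_ definition above) =====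
theorem parse_seamark_type_py_spec : Claim_equal_parse_seamark_type_py := by
  intro props _
  unfold Spec_parse_seamark_type_py
  simp only [parse_seamark_type_py, parse_seamark_type_py_alt]
  rw [pv_direct_eq props]
  by_cases ht : pvTruthy (if pvTruthy ((PySem.Dict.mk props).get? "seamark:type") = true
      then (PySem.Dict.mk props).get? "seamark:type"
      else (PySem.Dict.mk props).get? "seamark_type") = true
  · rw [if_pos ht, if_pos ht]
    cases hD : (if pvTruthy ((PySem.Dict.mk props).get? "seamark:type") = true
        then (PySem.Dict.mk props).get? "seamark:type"
        else (PySem.Dict.mk props).get? "seamark_type") with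
    | none => rw [hD] at ht; simp [pvTruthy] at ht
    | some v => rfl
  · rw [if_neg ht, if_neg ht]
    cases hot : (PySem.Dict.mk props).get? "other_tags" with
    | none => rfl
    | some ot => exact (pv_tail_eq ot).trans (pv_scanMarker_eq _ (by decide) ot.toList).symm
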